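-- pv_equiv track=rewrite | github.com/pypi-data/pypi-mirror-357 | packages/mark-mate/mark_mate-0.2.0-py3-none-any.whl/mark_mate/extractors/github_extractor.py | _find_peak_hours
-- ===== SOURCE A (Python) =====
-- from collections import defaultdict
--
-- def _find_peak_hours(commit_hours: list[int]) -> list[int]:
--     """Find the most common hours for commits."""
--     if not commit_hours:
--         return []
--
--     hour_counts = defaultdict(int)
--     for hour in commit_hours:
--         hour_counts[hour] += 1
--
--     if not hour_counts:
--         return []
--
--     max_count = max(hour_counts.values())
--     peak_hours = [hour for hour, count in hour_counts.items() if count == max_count]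
--
--     return sorted(peak_hours)
-- ===== SOURCE B (Python) =====
-- def _find_peak_hours(commit_hours: list[int]) -> list[int]:
--     """Find the most common hours for commits."""
--     if not commit_hours:
--         return []
--     s = sorted(commit_hours)
--     peaks = []
--     best = 0
--     i = 0
--     while i < len(s):
--         j = i + 1
--         while j < len(s) and s[j] == s[i]:
--             j += 1
--         run = j - i
--         if run > best:
--             best = run
--             peaks = [s[i]]
--         elif run == best:
--             peaks.append(s[i])
--         i = j
--     return peaks
-- ===== Notes on version B (the rewrite author's own statement) =====
-- stated objective: alternative
-- what changed: Replaces the defaultdict counting pass, max over dict values, filter and final sort by one sort of a copy followed by a single run-length scan that keeps the current best run length and the (already ascending) peak hours; no dictionary is built and no final sort is needed.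
import Mathlib
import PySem

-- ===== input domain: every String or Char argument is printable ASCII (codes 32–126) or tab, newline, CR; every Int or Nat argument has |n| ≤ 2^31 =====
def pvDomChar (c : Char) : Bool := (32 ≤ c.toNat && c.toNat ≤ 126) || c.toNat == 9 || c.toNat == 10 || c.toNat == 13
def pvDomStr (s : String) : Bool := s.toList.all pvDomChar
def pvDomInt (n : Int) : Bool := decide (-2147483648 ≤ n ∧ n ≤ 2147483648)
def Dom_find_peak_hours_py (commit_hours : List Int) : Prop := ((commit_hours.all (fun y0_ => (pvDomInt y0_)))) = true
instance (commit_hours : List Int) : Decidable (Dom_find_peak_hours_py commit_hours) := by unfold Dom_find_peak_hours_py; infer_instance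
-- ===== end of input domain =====

-- B replaces A's defaultdict counting pass, max over the dict's values, filter and
-- final sort by sorting a copy once and scanning it run by run, keeping the best
-- run length and the (already ascending) peak hours (objective: alternative).

-- ===== PORT A =====
def find_peak_hours_py (commit_hours : List Int) : List Int :=
  if commit_hours = [] then []
  else
    -- hour_counts = defaultdict(int); for hour in commit_hours: hour_counts[hour] += 1
    let hour_counts : PySem.Dict Int Int :=
      commit_hours.foldl (fun d hour => d.modify hour 0 (· + 1)) PySem.Dict.empty
    if hour_counts.items = [] then []
    else
      -- max_count = max(hour_counts.values())  (nonempty here; none branch unreachable)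
      match PySem.List.max? hour_counts.values (fun v => v) with
      | none => []
      | some max_count =>
        let peak_hours := (hour_counts.items.filter (fun p => p.2 == max_count)).map (·.1)
        PySem.List.sorted peak_hours (fun x => x) false

-- ===== PORT B =====
-- B's outer 'while i < len(s)' walks the sorted list suffix by suffix: the list
-- argument is s[i:], and the inner 'while s[j] == s[i]' scan of the current run is
-- the takeWhile/dropWhile split of that suffix; peaks/best are the loop state.
def pvRunScan (s : List Int) (peaks : List Int) (best : Int) : List Int :=
  match s with
  | [] => peaks
  | x :: rest =>
    let run : Int := 1 + (rest.takeWhile (· == x)).length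
    if best < run then pvRunScan (rest.dropWhile (· == x)) [x] run
    else if run = best then pvRunScan (rest.dropWhile (· == x)) (peaks ++ [x]) best
    else pvRunScan (rest.dropWhile (· == x)) peaks best
termination_by s.length
decreasing_by all_goals
  · have := List.length_dropWhile_le (· == x) rest
    simp only [List.length_cons]
    omega

def find_peak_hours_py_alt (commit_hours : List Int) : List Int :=
  if commit_hours = [] then []
  else pvRunScan (PySem.List.sorted commit_hours (fun x => x) false) [] 0

-- ===== PRECONDITION & SPEC =====
def Spec_find_peak_hours_py (commit_hours : List Int) (out : List Int) : Prop := out = find_peak_hours_py_alt commit_hours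
instance (commit_hours : List Int) (out : List Int) : Decidable (Spec_find_peak_hours_py commit_hours out) := by unfold Spec_find_peak_hours_py; infer_instance

-- ===== CLAIM (what is proved, stated in full; the proofs are below) =====
def Claim_equal_find_peak_hours_py : Prop := ∀ (commit_hours : List Int), Dom_find_peak_hours_py commit_hours → Spec_find_peak_hours_py commit_hours (find_peak_hours_py commit_hours)

-- ===== LEMMAS AND PROOFS =====

-- Proof-side companion of pvRunScan: the final value of 'best' (max of the initial
-- best and all run lengths of s).
def pvBestF (s : List Int) (best : Int) : Int :=
  match s with
  | [] => best
  | x :: rest =>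
      pvBestF (rest.dropWhile (· == x)) (max best (1 + (rest.takeWhile (· == x)).length))
termination_by s.length
decreasing_by
  · have := List.length_dropWhile_le (· == x) rest
    simp only [List.length_cons]
    omega

-- Facts about the takeWhile/dropWhile split of a sorted (x :: rest).
theorem pv_cons_facts (x : Int) (rest : List Int)
    (hs : (x :: rest).Pairwise (· ≤ ·)) :
    (∀ y ∈ rest.takeWhile (· == x), y = x) ∧
    (∀ y ∈ rest.dropWhile (· == x), x < y) ∧
    ((rest.dropWhile (· == x)).Pairwise (· ≤ ·)) := by
  obtain ⟨hle, hrest⟩ := List.pairwise_cons.mp hs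
  refine ⟨?_, ?_, List.Pairwise.sublist (List.dropWhile_sublist _) hrest⟩
  · intro y hy
    have hb := List.mem_takeWhile_imp hy
    exact eq_of_beq hb
  intro y hy
  cases hd : rest.dropWhile (· == x) with
  | nil => simp [hd] at hy
  | cons a as =>
    have hhead := List.head?_dropWhile_not (· == x) rest
    rw [hd] at hhead
    simp only [List.head?_cons, beq_eq_false_iff_ne, ne_eq] at hhead
    have ha : a ∈ rest := (List.dropWhile_sublist (· == x)).mem (by simp [hd])
    have hxa : x < a := lt_of_le_of_ne (hle a ha) (Ne.symm hhead)
    rw [hd] at hy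
    rcases List.mem_cons.mp hy with rfl | hy'
    · exact hxa
    · have hpw : (a :: as).Pairwise (· ≤ ·) := by
        rw [← hd]; exact List.Pairwise.sublist (List.dropWhile_sublist _) hrest
      exact lt_of_lt_of_le hxa ((List.pairwise_cons.mp hpw).1 y hy')

-- Count decomposition over a sorted (x :: rest).
theorem pv_count_facts (x : Int) (rest : List Int)
    (hs : (x :: rest).Pairwise (· ≤ ·)) :
    (List.count x (x :: rest) = 1 + (rest.takeWhile (· == x)).length) ∧
    (∀ y ∈ rest.dropWhile (· == x),
        List.count y (x :: rest) = List.count y (rest.dropWhile (· == x))) ∧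
    (∀ y, y ∈ x :: rest ↔ y = x ∨ y ∈ rest.dropWhile (· == x)) := by
  obtain ⟨ht, hr, _⟩ := pv_cons_facts x rest hs
  have hsplit : rest.takeWhile (· == x) ++ rest.dropWhile (· == x) = rest :=
    List.takeWhile_append_dropWhile
  have hct : List.count x (rest.takeWhile (· == x)) = (rest.takeWhile (· == x)).length :=
    List.count_eq_length.mpr (fun b hb => (ht b hb).symm)
  have hcr : List.count x (rest.dropWhile (· == x)) = 0 :=
    List.count_eq_zero.mpr (fun hx => lt_irrefl x (hr x hx))
  refine ⟨?_, ?_, ?_⟩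
  · rw [List.count_cons_self]
    conv_lhs => rw [← hsplit]
    rw [List.count_append, hct, hcr]
    omega
  · intro y hy
    have hxy : x < y := hr y hy
    have hyt : List.count y (rest.takeWhile (· == x)) = 0 :=
      List.count_eq_zero.mpr (fun hx => absurd (ht y hx) (ne_of_gt hxy))
    rw [List.count_cons_of_ne (by omega : x ≠ y)]
    conv_lhs => rw [← hsplit]
    rw [List.count_append, hyt]
    omega
  · intro y
    constructor
    · intro hy
      rcases List.mem_cons.mp hy with rfl | hy'
      · exact Or.inl rfl
      · rw [← hsplit] at hy'
        rcases List.mem_append.mp hy' with h1 | h2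
        · exact Or.inl (ht y h1)
        · exact Or.inr h2
    · rintro (rfl | hy')
      · exact List.mem_cons_self
      · exact List.mem_cons_of_mem x (hsplit ▸ List.mem_append_right _ hy')

theorem pv_le_bestF (s : List Int) (best : Int) : best ≤ pvBestF s best := by
  induction s, best using pvBestF.induct with
  | case1 best => simp [pvBestF]
  | case2 x rest best ih =>
    rw [pvBestF]
    exact le_trans (le_max_left _ _) ih

theorem pv_count_le_bestF (n : Nat) : ∀ (s : List Int), s.length ≤ n →
    s.Pairwise (· ≤ ·) → ∀ (best : Int), ∀ y ∈ s,
    (List.count y s : Int) ≤ pvBestF s best := by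
  induction n with
  | zero =>
    intro s hlen _ best y hy
    rw [List.length_eq_zero_iff.mp (Nat.le_zero.mp hlen)] at hy
    simp at hy
  | succ n ih =>
    intro s hlen hs best y hy
    cases s with
    | nil => simp at hy
    | cons x rest =>
      obtain ⟨hcx, hcr, hmem⟩ := pv_count_facts x rest hs
      obtain ⟨_, _, hsr⟩ := pv_cons_facts x rest hs
      have hrlen : (rest.dropWhile (· == x)).length ≤ n := by
        have := List.length_dropWhile_le (· == x) rest
        simp only [List.length_cons] at hlen
        omega
      rw [pvBestF]
      rcases (hmem y).mp hy with rfl | hy'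
      · rw [hcx]
        calc ((1 + (rest.takeWhile (· == y)).length : Nat) : Int)
            ≤ max best (1 + ((rest.takeWhile (· == y)).length : Int)) := by
              push_cast
              exact le_max_right _ _
          _ ≤ _ := pv_le_bestF _ _
      · rw [hcr y hy']
        exact ih _ hrlen hsr _ y hy'

theorem pv_bestF_cases (n : Nat) : ∀ (s : List Int), s.length ≤ n →
    s.Pairwise (· ≤ ·) → ∀ (best : Int),
    pvBestF s best = best ∨ ∃ y ∈ s, pvBestF s best = (List.count y s : Int) := by
  induction n with
  | zero =>
    intro s hlen _ best
    rw [List.length_eq_zero_iff.mp (Nat.le_zero.mp hlen)]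
    simp [pvBestF]
  | succ n ih =>
    intro s hlen hs best
    cases s with
    | nil => simp [pvBestF]
    | cons x rest =>
      obtain ⟨hcx, hcr, _⟩ := pv_count_facts x rest hs
      obtain ⟨_, _, hsr⟩ := pv_cons_facts x rest hs
      have hrlen : (rest.dropWhile (· == x)).length ≤ n := by
        have := List.length_dropWhile_le (· == x) rest
        simp only [List.length_cons] at hlen
        omega
      rw [pvBestF]
      rcases ih _ hrlen hsr (max best (1 + ((rest.takeWhile (· == x)).length : Int))) with hcase | ⟨y, hy, hyc⟩
      · rcases max_cases best (1 + ((rest.takeWhile (· == x)).length : Int)) with ⟨hm, _⟩ | ⟨hm, _⟩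
        · exact Or.inl (by rw [hcase, hm])
        · refine Or.inr ⟨x, List.mem_cons_self, ?_⟩
          rw [hcase, hm, hcx]
          push_cast
          ring
      · refine Or.inr ⟨y, ?_, ?_⟩
        · exact List.mem_cons_of_mem x ((List.dropWhile_sublist _).mem hy)
        · rw [hyc, hcr y hy]

-- Membership in the run scan's result: kept initial peaks (iff no run beat 'best')
-- plus exactly the elements of s whose count equals the final best.
theorem pv_mem_runScan (n : Nat) : ∀ (s : List Int), s.length ≤ n →
    s.Pairwise (· ≤ ·) → ∀ (peaks : List Int) (best : Int) (y : Int),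
    (y ∈ pvRunScan s peaks best ↔
      (y ∈ peaks ∧ pvBestF s best = best) ∨
      (y ∈ s ∧ (List.count y s : Int) = pvBestF s best)) := by
  induction n with
  | zero =>
    intro s hlen _ peaks best y
    rw [List.length_eq_zero_iff.mp (Nat.le_zero.mp hlen)]
    simp [pvRunScan, pvBestF]
  | succ n ih =>
    intro s hlen hs peaks best y
    cases s with
    | nil => simp [pvRunScan, pvBestF]
    | cons x rest =>
      obtain ⟨hcx, hcr, hmem⟩ := pv_count_facts x rest hs
      obtain ⟨_, hltr, hsr⟩ := pv_cons_facts x rest hs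
      have hrlen : (rest.dropWhile (· == x)).length ≤ n := by
        have := List.length_dropWhile_le (· == x) rest
        simp only [List.length_cons] at hlen
        omega
      have hcxI : (List.count x (x :: rest) : Int)
          = 1 + ((rest.takeWhile (· == x)).length : Int) := by
        rw [hcx]; push_cast; ring
      rw [pvRunScan, pvBestF]
      set run : Int := 1 + ((rest.takeWhile (· == x)).length : Int) with hrun
      set r := rest.dropWhile (· == x) with hr
      by_cases hb : best < run
      · have hmax : max best run = run := max_eq_right (le_of_lt hb)
        rw [if_pos hb, hmax, ih r hrlen hsr [x] run y]
        have hrM : run ≤ pvBestF r run := pv_le_bestF r run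
        constructor
        · rintro (⟨hy1, hy2⟩ | ⟨hy1, hy2⟩)
          · rcases List.mem_singleton.mp hy1 with rfl
            exact Or.inr ⟨(hmem y).mpr (Or.inl rfl), by rw [hcxI]; omega⟩
          · exact Or.inr ⟨(hmem y).mpr (Or.inr hy1), by rw [hcr y hy1]; exact hy2⟩
        · rintro (⟨_, hy2⟩ | ⟨hy1, hy2⟩)
          · omega
          · rcases (hmem y).mp hy1 with rfl | hy'
            · rw [hcxI] at hy2
              exact Or.inl ⟨List.mem_singleton_self y, hy2.symm⟩
            · rw [hcr y hy'] at hy2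
              exact Or.inr ⟨hy', hy2⟩
      · have hrb : run ≤ best := not_lt.mp hb
        have hmax : max best run = best := max_eq_left hrb
        rw [if_neg hb, hmax]
        by_cases he : run = best
        · rw [if_pos he, ih r hrlen hsr (peaks ++ [x]) best y]
          constructor
          · rintro (⟨hy1, hy2⟩ | ⟨hy1, hy2⟩)
            · rcases List.mem_append.mp hy1 with hp | hx1
              · exact Or.inl ⟨hp, hy2⟩
              · rcases List.mem_singleton.mp hx1 with rfl
                exact Or.inr ⟨(hmem y).mpr (Or.inl rfl), by rw [hcxI]; omega⟩
            · exact Or.inr ⟨(hmem y).mpr (Or.inr hy1), by rw [hcr y hy1]; exact hy2⟩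
          · rintro (⟨hy1, hy2⟩ | ⟨hy1, hy2⟩)
            · exact Or.inl ⟨List.mem_append_left _ hy1, hy2⟩
            · rcases (hmem y).mp hy1 with rfl | hy'
              · rw [hcxI] at hy2
                refine Or.inl ⟨List.mem_append_right _ (List.mem_singleton_self y), ?_⟩
                omega
              · rw [hcr y hy'] at hy2
                exact Or.inr ⟨hy', hy2⟩
        · rw [if_neg he, ih r hrlen hsr peaks best y]
          have hlt : run < best := lt_of_le_of_ne hrb he
          have hbM : best ≤ pvBestF r best := pv_le_bestF r best
          constructor
          · rintro (⟨hy1, hy2⟩ | ⟨hy1, hy2⟩)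
            · exact Or.inl ⟨hy1, hy2⟩
            · exact Or.inr ⟨(hmem y).mpr (Or.inr hy1), by rw [hcr y hy1]; exact hy2⟩
          · rintro (⟨hy1, hy2⟩ | ⟨hy1, hy2⟩)
            · exact Or.inl ⟨hy1, hy2⟩
            · rcases (hmem y).mp hy1 with rfl | hy'
              · rw [hcxI] at hy2
                omega
              · rw [hcr y hy'] at hy2
                exact Or.inr ⟨hy', hy2⟩

-- The run scan's output is strictly increasing.
theorem pv_pairwise_runScan (n : Nat) : ∀ (s : List Int), s.length ≤ n →
    s.Pairwise (· ≤ ·) → ∀ (peaks : List Int) (best : Int),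
    peaks.Pairwise (· < ·) → (∀ p ∈ peaks, ∀ z ∈ s, p < z) →
    (pvRunScan s peaks best).Pairwise (· < ·) := by
  induction n with
  | zero =>
    intro s hlen _ peaks best hpw _
    rw [List.length_eq_zero_iff.mp (Nat.le_zero.mp hlen)]
    simpa [pvRunScan] using hpw
  | succ n ih =>
    intro s hlen hs peaks best hpw hbelow
    cases s with
    | nil => simpa [pvRunScan] using hpw
    | cons x rest =>
      obtain ⟨_, hltr, hsr⟩ := pv_cons_facts x rest hs
      have hrlen : (rest.dropWhile (· == x)).length ≤ n := by
        have := List.length_dropWhile_le (· == x) rest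
        simp only [List.length_cons] at hlen
        omega
      have hrsub : ∀ z ∈ rest.dropWhile (· == x), z ∈ x :: rest :=
        fun z hz => List.mem_cons_of_mem x ((List.dropWhile_sublist _).mem hz)
      rw [pvRunScan]
      set run : Int := 1 + ((rest.takeWhile (· == x)).length : Int)
      by_cases hb : best < run
      · rw [if_pos hb]
        refine ih _ hrlen hsr [x] run (List.pairwise_singleton _ _) ?_
        intro p hp z hz
        rcases List.mem_singleton.mp hp with rfl
        exact hltr z hz
      · rw [if_neg hb]
        by_cases he : run = best
        · rw [if_pos he]
          refine ih _ hrlen hsr (peaks ++ [x]) best ?_ ?_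
          · rw [List.pairwise_append]
            refine ⟨hpw, List.pairwise_singleton _ _, ?_⟩
            intro p hp q hq
            rcases List.mem_singleton.mp hq with rfl
            exact hbelow p hp q List.mem_cons_self
          · intro p hp z hz
            rcases List.mem_append.mp hp with hp' | hx1
            · exact hbelow p hp' z (hrsub z hz)
            · rcases List.mem_singleton.mp hx1 with rfl
              exact hltr z hz
        · rw [if_neg he]
          exact ih _ hrlen hsr peaks best hpw
            (fun p hp z hz => hbelow p hp z (hrsub z hz))

-- ===== VERDICT (by name: the statement is the Claim_ definition above) =====
theorem find_peak_hours_py_spec : Claim_equal_find_peak_hours_py := by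
  intro ch _
  unfold Spec_find_peak_hours_py
  by_cases h : ch = []
  · simp [find_peak_hours_py, find_peak_hours_py_alt, h]
  · -- shared set-up
    have hcnt : ch.foldl (fun d hour => d.modify hour 0 (· + 1)) PySem.Dict.empty
        = PySem.Dict.counter ch := (PySem.Dict.counter_eq_foldl ch).symm
    have hne : PySem.Set.ofList ch ≠ [] := by
      intro hnil
      obtain ⟨x, hx⟩ := List.exists_mem_of_ne_nil ch h
      have := (PySem.Set.mem_ofList ch x).mpr hx
      simp [hnil] at this
    have hitems : (PySem.Dict.counter ch).items
        = (PySem.Set.ofList ch).map (fun k => (k, ((ch.count k : Int)))) :=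
      PySem.Dict.items_counter ch
    have hvals : (PySem.Dict.counter ch).values
        = (PySem.Set.ofList ch).map (fun k => ((ch.count k : Int))) := by
      simp only [PySem.Dict.values, hitems, List.map_map]
      rfl
    have hmapne : ¬ ((PySem.Set.ofList ch).map (fun k => (k, ((ch.count k : Int)))) = []) := by
      simpa using hne
    -- the sorted copy B scans
    set s := PySem.List.sorted ch (fun x => x) false with hsdef
    have hsperm : s.Perm ch := PySem.List.sorted_perm ch (fun x => x) false
    have hspw : s.Pairwise (· ≤ ·) := PySem.List.sorted_pairwise ch (fun x => x)
    have hsne : s ≠ [] := by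
      rw [hsdef, ne_eq, PySem.List.sorted_eq_nil_iff]; exact h
    have hcount : ∀ y, List.count y s = List.count y ch := fun y => hsperm.count_eq y
    have hmemS : ∀ y, y ∈ s ↔ y ∈ ch := fun y => hsperm.mem_iff
    -- B's final best
    set M := pvBestF s 0 with hMdef
    have hMle : ∀ y ∈ s, (List.count y s : Int) ≤ M :=
      fun y hy => pv_count_le_bestF s.length s le_rfl hspw 0 y hy
    have hMone : 1 ≤ M := by
      obtain ⟨y, hy⟩ := List.exists_mem_of_ne_nil s hsne
      have h1 : 1 ≤ List.count y s := List.count_pos_iff.mpr hy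
      have := hMle y hy
      omega
    simp only [find_peak_hours_py, find_peak_hours_py_alt, if_neg h, hcnt, hvals, hitems,
      ← hsdef]
    rw [if_neg hmapne]
    -- A's max over the counter's values is some mA, and mA = M
    cases hm : PySem.List.max? ((PySem.Set.ofList ch).map (fun k => ((ch.count k : Int))))
        (fun v => v) with
    | none =>
      rw [PySem.List.max?_eq_none_iff] at hm
      exact absurd (List.map_eq_nil_iff.mp hm) hne
    | some mA =>
      have hmA_eq_M : mA = M := by
        have hmAmem := PySem.List.max?_mem hm
        obtain ⟨k, hk, hka⟩ := List.mem_map.mp hmAmem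
        have hk' : k ∈ s := (hmemS k).mpr ((PySem.Set.mem_ofList ch k).mp hk)
        have h1 : mA ≤ M := by
          rw [← hka, ← hcount k]
          exact hMle k hk'
        have h2 : M ≤ mA := by
          rcases pv_bestF_cases s.length s le_rfl hspw 0 with h0 | ⟨y, hy, hyc⟩
          · omega
          · have hy' : y ∈ PySem.Set.ofList ch :=
              (PySem.Set.mem_ofList ch y).mpr ((hmemS y).mp hy)
            have : ((ch.count y : Int)) ∈
                (PySem.Set.ofList ch).map (fun k => ((ch.count k : Int))) :=
              List.mem_map_of_mem hy'
            have := PySem.List.max?_isMax hm _ this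
            rw [hMdef, hyc, hcount y]
            exact this
        omega
      -- A's peak list before sorting
      have hfilter :
          (((PySem.Set.ofList ch).map (fun k => (k, ((ch.count k : Int))))).filter
              (fun p => p.2 == mA)).map (fun p => p.1)
            = (PySem.Set.ofList ch).filter (fun k => ((ch.count k : Int) == mA)) := by
        rw [List.filter_map, List.map_map]
        simp [Function.comp_def]
      -- B's result
      have hresmem : ∀ y, y ∈ pvRunScan s [] 0 ↔ y ∈ s ∧ (List.count y s : Int) = M := by
        intro y
        rw [pv_mem_runScan s.length s le_rfl hspw [] 0 y]
        simp [← hMdef]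
      have hrespw : (pvRunScan s [] 0).Pairwise (· < ·) :=
        pv_pairwise_runScan s.length s le_rfl hspw [] 0 (List.Pairwise.nil) (by simp)
      have hperm : (pvRunScan s [] 0).Perm
          ((PySem.Set.ofList ch).filter (fun k => ((ch.count k : Int) == mA))) := by
        rw [List.perm_ext_iff_of_nodup
          (List.Pairwise.imp (fun hab => ne_of_lt hab) hrespw)
          ((PySem.Set.nodup_ofList ch).filter _)]
        intro y
        rw [hresmem y]
        simp only [List.mem_filter, PySem.Set.mem_ofList, beq_iff_eq, hmA_eq_M,
          hmemS y, hcount y]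
      show PySem.List.sorted
          ((((PySem.Set.ofList ch).map (fun k => (k, ((ch.count k : Int))))).filter
              (fun p => p.2 == mA)).map (fun p => p.1)) (fun v => v)
        = pvRunScan s [] 0
      rw [hfilter]
      exact PySem.List.sorted_eq_of_perm_of_pairwise_lt _ _ (fun x => x) hperm hrespw
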